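-- pv_equiv track=rewrite | github.com/sarahz101/customcipher | playfair-hill-cipher.py | derive_hill_matrix_from_key
-- ===== SOURCE A (Python) =====
-- MOD = 26
--
-- def sanitize_text(text):
--     return "".join([c.upper() for c in text if c.isalpha()])
--
-- def egcd(a,b):
--     if b==0:
--         return (a,1,0)
--     g,x1,y1 = egcd(b, a%b)
--     return (g, y1, x1 - (a//b)*y1)
--
-- def modinv(a, m=MOD):
--     a = a % m
--     g,x,y = egcd(a,m)
--     if g != 1:
--         return None
--     return x % m
--
-- def matrix_det_3(m):
--     a,b,c = m[0]
--     d,e,f = m[1]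
--     g,h,i = m[2]
--     return (a*(e*i - f*h) - b*(d*i - f*g) + c*(d*h - e*g)) % MOD
--
-- def matrix_adj_3(m):
--     a,b,c = m[0]
--     d,e,f = m[1]
--     g,h,i = m[2]
--     adj = [
--         [(e*i - f*h), -(b*i - c*h),  (b*f - c*e)],
--         [-(d*i - f*g), (a*i - c*g), -(a*f - c*d)],
--         [(d*h - e*g), -(a*h - b*g),  (a*e - b*d)]
--     ]
--     for r in range(3):
--         for s in range(3):
--             adj[r][s] = adj[r][s] % MOD
--     return adj
--
-- def matrix_inv_3(m):
--     det = matrix_det_3(m)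
--     invdet = modinv(det)
--     if invdet is None:
--         return None
--     adj = matrix_adj_3(m)
--     inv = [[(invdet * adj[r][c]) % MOD for c in range(3)] for r in range(3)]
--     return inv
--
-- def derive_hill_matrix_from_key(key_str):
--     s = sanitize_text(key_str)
--     if len(s) < 9:
--         s = s + ("A"*(9-len(s)))
--     s = s[:9]
--     m = [[(ord(s[3*r + c]) - 65) % MOD for c in range(3)] for r in range(3)]
--     attempts = 0
--     while matrix_inv_3(m) is None and attempts < 26:
--         m[2][2] = (m[2][2] + 1) % MOD
--         attempts += 1
--     if matrix_inv_3(m) is None: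
--         raise ValueError("Unable to derive invertible Hill matrix from key string.")
--     return m
-- ===== SOURCE B (Python) =====
-- def _first_offset(R, C):
--     # smallest t in [0,26) with gcd(R + C*t, 26) == 1, found by CRT case
--     # analysis on the residues mod 2 and mod 13 (no search, no inversion)
--     if C % 2 == 1:
--         t = (1 - R) % 2
--         if C % 13 == 0:
--             return None if R % 13 == 0 else t
--         return t + 2 if (R + C * t) % 13 == 0 else t
--     if R % 2 == 0:
--         return None
--     if C % 13 == 0:
--         return None if R % 13 == 0 else 0
--     return 1 if R % 13 == 0 else 0
--
-- def derive_hill_matrix_from_key(key_str):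
--     s = "".join(ch.upper() for ch in key_str if ch.isalpha())
--     s = (s + "A" * 9)[:9]
--     a, b, c, d, e, f, g, h, i0 = [(ord(ch) - 65) % 26 for ch in s]
--     C = (a * e - b * d) % 26
--     R = ((-a * f * h + b * f * g + c * (d * h - e * g)) + C * i0) % 26
--     t = _first_offset(R, C)
--     if t is None:
--         raise ValueError("Unable to derive invertible Hill matrix from key string.")
--     return [[a, b, c], [d, e, f], [g, h, (i0 + t) % 26]]
-- ===== Notes on version B (the rewrite author's own statement) =====
-- stated objective: alternative
-- what changed: B eliminates A's trial loop altogether: since the determinant is linear in the corner entry (det = R + C*t mod 26), B computes the needed corner offset t directly by a closed-form CRT case analysis on the residues mod 2 and mod 13, instead of A's loop that mutates the corner and runs a full matrix-inversion routine up to 26 times.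
import Mathlib
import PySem

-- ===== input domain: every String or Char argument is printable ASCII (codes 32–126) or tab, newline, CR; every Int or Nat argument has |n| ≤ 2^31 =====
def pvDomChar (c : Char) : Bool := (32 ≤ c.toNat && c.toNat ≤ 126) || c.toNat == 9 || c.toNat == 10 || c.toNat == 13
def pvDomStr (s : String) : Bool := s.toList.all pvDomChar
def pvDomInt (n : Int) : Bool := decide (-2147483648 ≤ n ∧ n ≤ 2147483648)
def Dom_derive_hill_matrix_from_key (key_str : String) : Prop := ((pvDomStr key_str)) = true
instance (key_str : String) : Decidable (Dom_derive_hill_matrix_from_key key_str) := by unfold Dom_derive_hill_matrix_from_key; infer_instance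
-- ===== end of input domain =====

-- B removes A's mutate-and-retry inversion loop entirely: the determinant is linear in the corner
-- entry (det ≡ R + C·t mod 26), so B computes the needed offset t in closed form by a CRT case
-- analysis mod 2 and mod 13; objective: alternative (loop-free arithmetic instead of 26 trials).

-- ===== PORT A =====
-- strings are handled as List Char throughout (PySem.Chars is the exact Python semantics)
def sanitize_text (text : String) : List Char :=
  (text.toList.filter (fun c => PySem.Chars.isalpha c)).map PySem.Chars.upperChar

-- egcd: structural recursion with fuel |b|+1, which is always sufficient (|a % b| < |b| for b ≠ 0),
-- so egcdF computes exactly Python's egcd on every input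
def egcdF : Nat → Int → Int → Int × Int × Int
  | 0, a, _ => (a, 1, 0)   -- never reached with fuel = |b| + 1
  | fuel + 1, a, b =>
    if b = 0 then (a, 1, 0)
    else
      let r := egcdF fuel b (PySem.Int.mod a b)
      (r.1, r.2.2, r.2.1 - PySem.Int.floordiv a b * r.2.2)

def egcd (a b : Int) : Int × Int × Int := egcdF (b.natAbs + 1) a b

def modinv (a : Int) (m : Int) : Option Int :=
  let a' := PySem.Int.mod a m
  let r := egcd a' m
  if r.1 ≠ 1 then none else some (PySem.Int.mod r.2.1 m)

-- a,b,c = m[0] etc.: indices are always in range on the 3×3 matrices this module builds,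
-- so getD is exact here
def matrix_det_3 (m : List (List Int)) : Int :=
  let r0 := m.getD 0 []; let a := r0.getD 0 0; let b := r0.getD 1 0; let c := r0.getD 2 0
  let r1 := m.getD 1 []; let d := r1.getD 0 0; let e := r1.getD 1 0; let f := r1.getD 2 0
  let r2 := m.getD 2 []; let g := r2.getD 0 0; let h := r2.getD 1 0; let i := r2.getD 2 0
  PySem.Int.mod (a * (e * i - f * h) - b * (d * i - f * g) + c * (d * h - e * g)) 26

-- the r/s index loop reducing each entry mod 26 is written as the entrywise map it performs
def matrix_adj_3 (m : List (List Int)) : List (List Int) :=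
  let r0 := m.getD 0 []; let a := r0.getD 0 0; let b := r0.getD 1 0; let c := r0.getD 2 0
  let r1 := m.getD 1 []; let d := r1.getD 0 0; let e := r1.getD 1 0; let f := r1.getD 2 0
  let r2 := m.getD 2 []; let g := r2.getD 0 0; let h := r2.getD 1 0; let i := r2.getD 2 0
  let adj := [[e * i - f * h, -(b * i - c * h), b * f - c * e],
              [-(d * i - f * g), a * i - c * g, -(a * f - c * d)],
              [d * h - e * g, -(a * h - b * g), a * e - b * d]]
  adj.map (fun row => row.map (fun x => PySem.Int.mod x 26))

def matrix_inv_3 (m : List (List Int)) : Option (List (List Int)) :=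
  let det := matrix_det_3 m
  match modinv det 26 with
  | none => none
  | some invdet =>
    let adj := matrix_adj_3 m
    some ((List.range 3).map (fun r =>
      (List.range 3).map (fun c => PySem.Int.mod (invdet * (adj.getD r []).getD c 0) 26)))

-- m[2][2] = (m[2][2] + 1) % 26  (indices in range on the 3×3 matrix)
def hillUpd22 (m : List (List Int)) : List (List Int) :=
  let row := m.getD 2 []
  m.set 2 (row.set 2 (PySem.Int.mod (row.getD 2 0 + 1) 26))

-- while matrix_inv_3(m) is None and attempts < 26: …
def hillLoop (m : List (List Int)) (attempts : Nat) : List (List Int) :=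
  if matrix_inv_3 m = none ∧ attempts < 26 then hillLoop (hillUpd22 m) (attempts + 1) else m
termination_by 26 - attempts

def derive_hill_matrix_from_key (key_str : String) : List (List Int) :=
  let s0 := sanitize_text key_str
  let s1 := if s0.length < 9 then s0 ++ List.replicate (9 - s0.length) 'A' else s0
  let s := PySem.List.slice s1 none (some 9)
  let m := (List.range 3).map (fun r =>
    (List.range 3).map (fun c => PySem.Int.mod ((s.getD (3 * r + c) 'A').toNat - 65) 26))
  let m' := hillLoop m 0
  if matrix_inv_3 m' = none then [] else m'   -- the raise ValueError branch; excluded by Pre_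

-- ===== PORT B =====
-- _first_offset: CRT case analysis, literally Source B's branch structure
def hillT (R C : Int) : Option Int :=
  if PySem.Int.mod C 2 = 1 then
    let t := PySem.Int.mod (1 - R) 2
    if PySem.Int.mod C 13 = 0 then
      (if PySem.Int.mod R 13 = 0 then none else some t)
    else if PySem.Int.mod (R + C * t) 13 = 0 then some (t + 2) else some t
  else
    if PySem.Int.mod R 2 = 0 then none
    else if PySem.Int.mod C 13 = 0 then
      (if PySem.Int.mod R 13 = 0 then none else some 0)
    else if PySem.Int.mod R 13 = 0 then some 1 else some 0

def derive_hill_matrix_from_key_alt (key_str : String) : List (List Int) :=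
  let s0 := (key_str.toList.filter (fun c => PySem.Chars.isalpha c)).map PySem.Chars.upperChar
  let s := PySem.List.slice (s0 ++ List.replicate 9 'A') none (some 9)
  let v := s.map (fun ch => PySem.Int.mod ((ch.toNat : Int) - 65) 26)
  let a := v.getD 0 0; let b := v.getD 1 0; let c := v.getD 2 0
  let d := v.getD 3 0; let e := v.getD 4 0; let f := v.getD 5 0
  let g := v.getD 6 0; let h := v.getD 7 0; let i0 := v.getD 8 0
  let C := PySem.Int.mod (a * e - b * d) 26
  let R := PySem.Int.mod ((-a * f * h + b * f * g + c * (d * h - e * g)) + C * i0) 26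
  match hillT R C with
  | none => []   -- the raise ValueError branch; excluded by Pre_
  | some t => [[a, b, c], [d, e, f], [g, h, PySem.Int.mod (i0 + t) 26]]

-- ===== PRECONDITION & SPEC =====
-- the nine key values (shared spec helper, used only by Pre_ and the proofs)
def hillKeyVals (key_str : String) : List Int :=
  (PySem.List.slice
      (((key_str.toList.filter (fun c => PySem.Chars.isalpha c)).map PySem.Chars.upperChar)
        ++ List.replicate 9 'A')
      none (some 9)).map (fun c => PySem.Int.mod ((c.toNat : Int) - 65) 26)

def hillGood (v : List Int) (t : Nat) : Bool :=
  let a := v.getD 0 0; let b := v.getD 1 0; let c := v.getD 2 0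
  let d := v.getD 3 0; let e := v.getD 4 0; let f := v.getD 5 0
  let g := v.getD 6 0; let h := v.getD 7 0; let i0 := v.getD 8 0
  let cof := a * e - b * d
  let rest := -a * f * h + b * f * g + c * (d * h - e * g)
  let det := PySem.Int.mod (rest + cof * PySem.Int.mod (i0 + (t : Int)) 26) 26
  decide (PySem.Int.mod det 2 ≠ 0 ∧ PySem.Int.mod det 13 ≠ 0)

-- Pre_ excludes exactly the keys on which Python A raises ValueError (no corner value makes the
-- determinant coprime with 26); Python B raises there too.
def Pre_derive_hill_matrix_from_key (key_str : String) : Prop :=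
  (List.range 26).any (fun t => hillGood (hillKeyVals key_str) t) = true
instance (key_str : String) : Decidable (Pre_derive_hill_matrix_from_key key_str) := by
  unfold Pre_derive_hill_matrix_from_key; infer_instance

def pvWitness_derive_hill_matrix_from_key : String := "GYBNQKURP"

def Spec_derive_hill_matrix_from_key (key_str : String) (out : List (List Int)) : Prop := out = derive_hill_matrix_from_key_alt key_str
instance (key_str : String) (out : List (List Int)) : Decidable (Spec_derive_hill_matrix_from_key key_str out) := by unfold Spec_derive_hill_matrix_from_key; infer_instance

-- ===== CLAIM (what is proved, stated in full; the proofs are below) =====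
def Claim_equal_derive_hill_matrix_from_key : Prop := ∀ (key_str : String), Dom_derive_hill_matrix_from_key key_str → Pre_derive_hill_matrix_from_key key_str → Spec_derive_hill_matrix_from_key key_str (derive_hill_matrix_from_key key_str)

-- ===== LEMMAS AND PROOFS =====

theorem modinv_none_iff (d : Int) (h0 : 0 ≤ d) (h1 : d < 26) :
    (modinv d 26 = none) ↔ ¬(PySem.Int.mod d 2 ≠ 0 ∧ PySem.Int.mod d 13 ≠ 0) := by
  interval_cases d <;> decide

theorem inv_none_iff (m : List (List Int)) :
    matrix_inv_3 m = none ↔ modinv (matrix_det_3 m) 26 = none := by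
  unfold matrix_inv_3
  cases h : modinv (matrix_det_3 m) 26 <;> simp [h]

theorem det_M (x0 x1 x2 x3 x4 x5 x6 x7 i : Int) :
    matrix_det_3 [[x0,x1,x2],[x3,x4,x5],[x6,x7,i]]
      = PySem.Int.mod ((-x0*x5*x7 + x1*x5*x6 + x2*(x3*x7 - x4*x6)) + (x0*x4 - x1*x3) * i) 26 := by
  simp [matrix_det_3]; congr 1; ring

theorem upd22_M (x0 x1 x2 x3 x4 x5 x6 x7 i : Int) :
    hillUpd22 [[x0,x1,x2],[x3,x4,x5],[x6,x7,i]]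
      = [[x0,x1,x2],[x3,x4,x5],[x6,x7, PySem.Int.mod (i+1) 26]] := by
  simp [hillUpd22]

theorem hill_pad_trunc (l : List Char) :
    PySem.List.slice (if l.length < 9 then l ++ List.replicate (9 - l.length) 'A' else l)
        none (some 9)
      = PySem.List.slice (l ++ List.replicate 9 'A') none (some 9) := by
  rw [PySem.List.slice_to _ (by norm_num), PySem.List.slice_to _ (by norm_num)]
  have h9 : (9 : Int).toNat = 9 := rfl
  rw [h9]
  split_ifs with h
  · rw [List.take_append, List.take_append, List.take_replicate, List.take_replicate,
        List.take_of_length_le (Nat.le_of_lt h)]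
    congr 2
    omega
  · rw [List.take_append, List.take_replicate]
    have h0 : 9 - l.length = 0 := by omega
    simp [h0]

theorem mod26_step (z : Int) :
    PySem.Int.mod (PySem.Int.mod z 26 + 1) 26 = PySem.Int.mod (z + 1) 26 := by
  rw [PySem.Int.mod_eq_emod_of_pos (by norm_num), PySem.Int.mod_eq_emod_of_pos (by norm_num),
      PySem.Int.mod_eq_emod_of_pos (by norm_num)]
  omega

theorem hillLoop_eq (x0 x1 x2 x3 x4 x5 x6 x7 x8 : Int) :
    ∀ (n t : Nat), t + n = 26 →
    hillLoop [[x0,x1,x2],[x3,x4,x5],[x6,x7, PySem.Int.mod (x8 + (t : Int)) 26]] t =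
      match (List.range' t n).find?
          (fun (k : Nat) => decide (¬ matrix_inv_3
            [[x0,x1,x2],[x3,x4,x5],[x6,x7, PySem.Int.mod (x8 + (k : Int)) 26]] = none)) with
      | some k => [[x0,x1,x2],[x3,x4,x5],[x6,x7, PySem.Int.mod (x8 + (k : Int)) 26]]
      | none => [[x0,x1,x2],[x3,x4,x5],[x6,x7, PySem.Int.mod (x8 + 26) 26]] := by
  intro n
  induction n with
  | zero =>
    intro t ht
    rw [hillLoop]
    simp only [List.range'_zero, List.find?_nil]
    have hc : ¬ (matrix_inv_3 [[x0,x1,x2],[x3,x4,x5],[x6,x7, PySem.Int.mod (x8 + (t:Int)) 26]] = none ∧ t < 26) := by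
      rintro ⟨-, h⟩; omega
    rw [if_neg hc]
    have ht' : (t : Int) = 26 := by omega
    rw [ht']
  | succ n ih =>
    intro t ht
    rw [hillLoop]
    rw [List.range'_succ, List.find?_cons]
    by_cases hinv : matrix_inv_3 [[x0,x1,x2],[x3,x4,x5],[x6,x7, PySem.Int.mod (x8 + (t:Int)) 26]] = none
    · rw [if_pos ⟨hinv, by omega⟩]
      rw [upd22_M, mod26_step]
      have hcast : (x8 + (t : Int)) + 1 = x8 + ((t + 1 : Nat) : Int) := by push_cast; ring
      rw [hcast, ih (t+1) (by omega)]
      simp only [hinv, not_true, decide_false]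
    · have hdec : (decide (¬ matrix_inv_3
            [[x0,x1,x2],[x3,x4,x5],[x6,x7, PySem.Int.mod (x8 + (t : Int)) 26]] = none)) = true := by
        simpa using hinv
      rw [hdec]
      rw [if_neg (by rintro ⟨h, -⟩; exact hinv h)]

theorem good_iff (x0 x1 x2 x3 x4 x5 x6 x7 x8 : Int) (k : Nat) :
    hillGood [x0,x1,x2,x3,x4,x5,x6,x7,x8] k
      = decide (¬ matrix_inv_3
          [[x0,x1,x2],[x3,x4,x5],[x6,x7, PySem.Int.mod (x8 + (k : Int)) 26]] = none) := by
  have hd := det_M x0 x1 x2 x3 x4 x5 x6 x7 (PySem.Int.mod (x8 + (k : Int)) 26)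
  have h0 : 0 ≤ matrix_det_3 [[x0,x1,x2],[x3,x4,x5],[x6,x7, PySem.Int.mod (x8 + (k:Int)) 26]] :=
    hd ▸ PySem.Int.mod_nonneg _ (by norm_num)
  have h1 : matrix_det_3 [[x0,x1,x2],[x3,x4,x5],[x6,x7, PySem.Int.mod (x8 + (k:Int)) 26]] < 26 :=
    hd ▸ PySem.Int.mod_lt _ (by norm_num)
  have hiff := (inv_none_iff _).trans (modinv_none_iff _ h0 h1)
  simp only [hillGood, List.getD_cons_zero, List.getD_cons_succ]
  rw [← hd, decide_eq_decide]
  constructor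
  · intro hp hnone; exact (hiff.mp hnone) hp
  · intro hp; by_contra hq; exact hp (hiff.mpr hq)

theorem exists_nine {α : Type} (l : List α) (h : l.length = 9) :
    ∃ a b c d e f g h' i, l = [a,b,c,d,e,f,g,h',i] := by
  rcases l with _|⟨a,_|⟨b,_|⟨c,_|⟨d,_|⟨e,_|⟨f,_|⟨g,_|⟨h',_|⟨i,_|⟨j,r⟩⟩⟩⟩⟩⟩⟩⟩⟩⟩ <;> simp_all

-- the B-side predicate on the reduced parameters R, C
def goodRC (R C : Int) (t : Nat) : Bool :=
  let det := PySem.Int.mod (R + C * (t : Int)) 26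
  decide (PySem.Int.mod det 2 ≠ 0 ∧ PySem.Int.mod det 13 ≠ 0)

-- the determinant, as A computes it, equals R + C·t mod 26
theorem good_RC (x0 x1 x2 x3 x4 x5 x6 x7 x8 : Int) (t : Nat) :
    hillGood [x0,x1,x2,x3,x4,x5,x6,x7,x8] t
      = goodRC
          (PySem.Int.mod ((-x0*x5*x7 + x1*x5*x6 + x2*(x3*x7 - x4*x6))
              + PySem.Int.mod (x0*x4 - x1*x3) 26 * x8) 26)
          (PySem.Int.mod (x0*x4 - x1*x3) 26) t := by
  simp only [hillGood, goodRC, List.getD_cons_zero, List.getD_cons_succ]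
  have hdet :
      PySem.Int.mod ((-x0*x5*x7 + x1*x5*x6 + x2*(x3*x7 - x4*x6))
          + (x0*x4 - x1*x3) * PySem.Int.mod (x8 + (t:Int)) 26) 26
        = PySem.Int.mod (PySem.Int.mod ((-x0*x5*x7 + x1*x5*x6 + x2*(x3*x7 - x4*x6))
              + PySem.Int.mod (x0*x4 - x1*x3) 26 * x8) 26
            + PySem.Int.mod (x0*x4 - x1*x3) 26 * (t:Int)) 26 := by
    simp only [PySem.Int.mod_eq_emod_of_pos (by norm_num : (0:Int) < 26)]
    set rest := -x0*x5*x7 + x1*x5*x6 + x2*(x3*x7 - x4*x6) with hrest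
    set cof := x0*x4 - x1*x3 with hcof
    have h1 : (rest + cof * ((x8 + (t:Int)) % 26)) % 26
        = (rest + cof * (x8 + (t:Int))) % 26 :=
      Int.ModEq.add_left rest (Int.ModEq.mul_left cof (Int.emod_emod_of_dvd _ dvd_rfl))
    have h2 : ((rest + cof % 26 * x8) % 26 + cof % 26 * (t:Int)) % 26
        = (rest + cof * (x8 + (t:Int))) % 26 := by
      have hc : cof % 26 ≡ cof [ZMOD 26] := Int.emod_emod_of_dvd _ dvd_rfl
      have hm : (rest + cof % 26 * x8) % 26 + cof % 26 * (t:Int)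
          ≡ rest + cof * x8 + cof * (t:Int) [ZMOD 26] :=
        Int.ModEq.add
          ((Int.emod_emod_of_dvd _ dvd_rfl).trans (Int.ModEq.add_left rest (hc.mul_right x8)))
          (hc.mul_right _)
      calc ((rest + cof % 26 * x8) % 26 + cof % 26 * (t:Int)) % 26
          = (rest + cof * x8 + cof * (t:Int)) % 26 := hm
        _ = (rest + cof * (x8 + (t:Int))) % 26 := by ring_nf
    rw [h1, ← h2]
  rw [hdet]

-- the closed-form offset is the first index the search finds (finite check over all (R,C))
theorem hillT_eq_find : ∀ (R C : Fin 26),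
    hillT (R : Int) (C : Int)
      = ((List.range 26).find? (fun t => goodRC (R : Int) (C : Int) t)).map (fun t => (t : Int)) := by
  decide

theorem hill_core_ints (x0 x1 x2 x3 x4 x5 x6 x7 x8 : Int) (h8 : 0 ≤ x8) (h8' : x8 < 26)
    (hpre : ((List.range 26).any (fun t => hillGood [x0,x1,x2,x3,x4,x5,x6,x7,x8] t)) = true) :
    (if matrix_inv_3 (hillLoop [[x0,x1,x2],[x3,x4,x5],[x6,x7,x8]] 0) = none then []
     else hillLoop [[x0,x1,x2],[x3,x4,x5],[x6,x7,x8]] 0)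
    = match (List.range 26).find? (fun t => hillGood [x0,x1,x2,x3,x4,x5,x6,x7,x8] t) with
      | some t => [[x0,x1,x2],[x3,x4,x5],[x6,x7, PySem.Int.mod (x8 + (t:Int)) 26]]
      | none => [] := by
  have hx8 : PySem.Int.mod (x8 + ((0:Nat):Int)) 26 = x8 := by
    rw [PySem.Int.mod_eq_emod_of_pos (by norm_num)]
    push_cast
    omega
  have hL := hillLoop_eq x0 x1 x2 x3 x4 x5 x6 x7 x8 26 0 rfl
  rw [hx8] at hL
  have hfun : (fun (t : Nat) => hillGood [x0,x1,x2,x3,x4,x5,x6,x7,x8] t)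
      = (fun (k : Nat) => decide (¬ matrix_inv_3
          [[x0,x1,x2],[x3,x4,x5],[x6,x7, PySem.Int.mod (x8 + (k : Int)) 26]] = none)) :=
    funext (fun k => good_iff x0 x1 x2 x3 x4 x5 x6 x7 x8 k)
  rw [hfun] at hpre ⊢
  rw [hL, ← List.range_eq_range']
  cases hfind : (List.range 26).find?
      (fun (k : Nat) => decide (¬ matrix_inv_3
        [[x0,x1,x2],[x3,x4,x5],[x6,x7, PySem.Int.mod (x8 + (k : Int)) 26]] = none)) with
  | none =>
    exfalso
    rw [List.find?_eq_none] at hfind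
    rw [List.any_eq_true] at hpre
    obtain ⟨t, ht, hgt⟩ := hpre
    exact hfind t ht hgt
  | some k =>
    have hk0 : decide (¬ matrix_inv_3
        [[x0,x1,x2],[x3,x4,x5],[x6,x7, PySem.Int.mod (x8 + (k:Int)) 26]] = none) = true := by
      have h := List.find?_some hfind
      simpa using h
    have hk' : ¬ matrix_inv_3 [[x0,x1,x2],[x3,x4,x5],[x6,x7, PySem.Int.mod (x8 + (k:Int)) 26]] = none :=
      of_decide_eq_true hk0
    rw [if_neg hk']

-- B's core on nine reduced values equals the find?-form of A's loop
theorem alt_core_ints (x0 x1 x2 x3 x4 x5 x6 x7 x8 : Int) :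
    (let C := PySem.Int.mod (x0*x4 - x1*x3) 26
     let R := PySem.Int.mod ((-x0*x5*x7 + x1*x5*x6 + x2*(x3*x7 - x4*x6)) + C * x8) 26
     match hillT R C with
     | none => ([] : List (List Int))
     | some t => [[x0,x1,x2],[x3,x4,x5],[x6,x7, PySem.Int.mod (x8 + t) 26]])
    = match (List.range 26).find? (fun t => hillGood [x0,x1,x2,x3,x4,x5,x6,x7,x8] t) with
      | some t => [[x0,x1,x2],[x3,x4,x5],[x6,x7, PySem.Int.mod (x8 + (t:Int)) 26]]
      | none => [] := by
  simp only
  set C := PySem.Int.mod (x0*x4 - x1*x3) 26 with hC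
  set R := PySem.Int.mod ((-x0*x5*x7 + x1*x5*x6 + x2*(x3*x7 - x4*x6)) + C * x8) 26 with hR
  have hfun : (fun (t : Nat) => hillGood [x0,x1,x2,x3,x4,x5,x6,x7,x8] t)
      = (fun t => goodRC R C t) :=
    funext (fun t => good_RC x0 x1 x2 x3 x4 x5 x6 x7 x8 t)
  rw [hfun]
  have hR0 : 0 ≤ R := PySem.Int.mod_nonneg _ (by norm_num)
  have hR1 : R < 26 := PySem.Int.mod_lt _ (by norm_num)
  have hC0 : 0 ≤ C := PySem.Int.mod_nonneg _ (by norm_num)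
  have hC1 : C < 26 := PySem.Int.mod_lt _ (by norm_num)
  have hT := hillT_eq_find ⟨R.toNat, by omega⟩ ⟨C.toNat, by omega⟩
  rw [Int.toNat_of_nonneg hR0, Int.toNat_of_nonneg hC0] at hT
  rw [hT]
  cases (List.range 26).find? (fun t => goodRC R C t) <;> simp

theorem hill_core (S : List Char) (hlen : S.length = 9)
    (hpre : ((List.range 26).any (fun t =>
        hillGood (S.map (fun c => PySem.Int.mod ((c.toNat : Int) - 65) 26)) t)) = true) :
    (let m := (List.range 3).map (fun r => (List.range 3).map (fun c =>
        PySem.Int.mod (((S.getD (3*r+c) 'A').toNat : Int) - 65) 26));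
     let m' := hillLoop m 0;
     if matrix_inv_3 m' = none then [] else m') =
    (let v := S.map (fun c => PySem.Int.mod ((c.toNat : Int) - 65) 26);
     let a := v.getD 0 0; let b := v.getD 1 0; let c := v.getD 2 0
     let d := v.getD 3 0; let e := v.getD 4 0; let f := v.getD 5 0
     let g := v.getD 6 0; let h := v.getD 7 0; let i0 := v.getD 8 0
     let C := PySem.Int.mod (a * e - b * d) 26
     let R := PySem.Int.mod ((-a * f * h + b * f * g + c * (d * h - e * g)) + C * i0) 26
     match hillT R C with
     | none => ([] : List (List Int))
     | some t => [[a, b, c], [d, e, f], [g, h, PySem.Int.mod (i0 + t) 26]]) := by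
  obtain ⟨c0,c1,c2,c3,c4,c5,c6,c7,c8, rfl⟩ := exists_nine S hlen
  refine Eq.trans (hill_core_ints _ _ _ _ _ _ _ _ _
    (PySem.Int.mod_nonneg _ (by norm_num)) (PySem.Int.mod_lt _ (by norm_num)) hpre) ?_
  exact (alt_core_ints _ _ _ _ _ _ _ _ _).symm

theorem main_spec (key_str : String) (hpre : Pre_derive_hill_matrix_from_key key_str) :
    derive_hill_matrix_from_key key_str = derive_hill_matrix_from_key_alt key_str := by
  unfold Pre_derive_hill_matrix_from_key hillKeyVals at hpre
  show (let s0 := sanitize_text key_str;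
        let s1 := if s0.length < 9 then s0 ++ List.replicate (9 - s0.length) 'A' else s0;
        let s := PySem.List.slice s1 none (some 9);
        let m := (List.range 3).map (fun r => (List.range 3).map (fun c =>
          PySem.Int.mod (((s.getD (3*r+c) 'A').toNat : Int) - 65) 26));
        let m' := hillLoop m 0;
        if matrix_inv_3 m' = none then [] else m') = _
  simp only [hill_pad_trunc]
  exact hill_core _ (by rw [PySem.List.slice_to _ (by norm_num)]; simp) hpre

-- ===== VERDICT (by name: the statement is the Claim_ definition above) =====
theorem derive_hill_matrix_from_key_spec : Claim_equal_derive_hill_matrix_from_key := by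
  intro key_str _hdom hpre
  unfold Spec_derive_hill_matrix_from_key
  exact main_spec key_str hpre
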